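-- pv_equiv track=rewrite | github.com/clovis/PhiloLogic4-templates | reports/time_series.py | round_quarter
-- ===== SOURCE A (Python) =====
-- def round_quarter(date):
--     century = int(str(date)[:2] + '00')
--     quarter = century + 25
--     half = century + 50
--     last_quarter = century + 75
--     next_century = century + 100
--     date_collection = [century, quarter, half, last_quarter, next_century]
--     return min((abs(date - i), i) for i in date_collection)[1]
-- ===== SOURCE B (Python) =====
-- def round_quarter(date):
--     century = int(str(date)[:2] + '00')
--     k = max(0, min(4, (date - century + 12) // 25))
--     return century + 25 * k
-- ===== Notes on version B (the rewrite author's own statement) =====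
-- stated objective: simpler
-- what changed: B keeps A's string-based century but replaces the five-candidate list and the lexicographic min scan with a closed-form round-to-nearest-25 (floor-divide with +12 offset) clamped to the 0..4 quarter range.
import Mathlib
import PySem

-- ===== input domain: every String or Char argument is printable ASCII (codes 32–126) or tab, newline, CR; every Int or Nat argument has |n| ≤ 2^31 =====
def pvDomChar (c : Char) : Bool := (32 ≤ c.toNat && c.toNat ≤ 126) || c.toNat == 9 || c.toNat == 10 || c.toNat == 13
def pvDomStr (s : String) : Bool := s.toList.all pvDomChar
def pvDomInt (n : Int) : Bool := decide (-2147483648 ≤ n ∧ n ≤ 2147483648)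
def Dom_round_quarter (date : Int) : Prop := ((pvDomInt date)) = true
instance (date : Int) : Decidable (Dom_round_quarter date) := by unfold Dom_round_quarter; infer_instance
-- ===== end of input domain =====

-- B replaces A's five-candidate enumeration + lexicographic min scan with a direct
-- round-to-nearest-25 formula (floor-divide + clamp); objective: simpler.

-- ===== PORT A =====
-- str(date)[:2] = take 2 on str(date)'s characters (a nonnegative slice bound clamps, exact);
-- int(...) via PySem.Int.ofChars? — it never returns none here (the string is always a
-- valid int literal: a digit or '-'+digit followed by "00"), .getD 0 only discharges the Option.
def round_quarter (date : Int) : Int :=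
  let century := (PySem.Int.ofChars? ((PySem.Int.toChars date).take 2 ++ ['0', '0'])).getD 0
  let quarter := century + 25
  let half := century + 50
  let last_quarter := century + 75
  let next_century := century + 100
  let date_collection := [century, quarter, half, last_quarter, next_century]
  -- min of (abs(date-i), i) tuples: lexicographic, first extremal = PySem.List.min2?;
  -- then [1]; .getD 0 discharges the Option (the list is nonempty, min2? is never none)
  ((PySem.List.min2? (date_collection.map (fun i => (|date - i|, i)))
      (fun p => p.1) (fun p => p.2)).map (fun m => m.2)).getD 0

-- ===== PORT B =====
def round_quarter_alt (date : Int) : Int :=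
  let century := (PySem.Int.ofChars? ((PySem.Int.toChars date).take 2 ++ ['0', '0'])).getD 0
  let k := max 0 (min 4 (PySem.Int.floordiv (date - century + 12) 25))
  century + 25 * k

-- ===== PRECONDITION & SPEC =====
def Spec_round_quarter (date : Int) (out : Int) : Prop := out = round_quarter_alt date
instance (date : Int) (out : Int) : Decidable (Spec_round_quarter date out) := by unfold Spec_round_quarter; infer_instance

-- ===== CLAIM (what is proved, stated in full; the proofs are below) =====
def Claim_equal_round_quarter : Prop := ∀ (date : Int), Dom_round_quarter date → Spec_round_quarter date (round_quarter date)

-- ===== LEMMAS AND PROOFS =====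

-- the lexicographic "keep the better pair" step of Python's min over (key, value) tuples
def pvPick (m x : Int × Int) : Int × Int :=
  if x.1 < m.1 ∨ (¬ (m.1 < x.1) ∧ x.2 < m.2) then x else m

theorem pv_min2_pick : ∀ (l : List (Int × Int)) (a : Int × Int),
    PySem.List.min2? (a :: l) (fun p => p.1) (fun p => p.2) = some (l.foldl pvPick a) := by
  intro l
  induction l with
  | nil => intro a; rfl
  | cons x t ih =>
    intro a
    rw [List.foldl_cons, ← ih (pvPick a x)]
    show List.foldl _ (some a) (x :: t) = List.foldl _ (some (pvPick a x)) t
    rw [List.foldl_cons]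
    congr 1
    show (if (decide (x.1 < a.1) || !decide (a.1 < x.1) && decide (x.2 < a.2)) = true
        then some x else some a) = some (pvPick a x)
    unfold pvPick
    split_ifs with h1 h2 <;>
      first
      | rfl
      | (exfalso
         simp only [Bool.or_eq_true, Bool.and_eq_true, Bool.not_eq_true',
           decide_eq_true_eq, decide_eq_false_iff_not, not_lt] at h1
         omega)

theorem pvPick_left (m x : Int × Int) (h : x.1 < m.1 ∨ (¬ (m.1 < x.1) ∧ x.2 < m.2)) :
    pvPick m x = x := by unfold pvPick; exact if_pos h

theorem pvPick_right (m x : Int × Int) (h : ¬(x.1 < m.1 ∨ (¬ (m.1 < x.1) ∧ x.2 < m.2))) :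
    pvPick m x = m := by unfold pvPick; exact if_neg h

-- core arithmetic fact: the lexicographic min over the five quarter candidates of a
-- century c equals c + 25 * (offset rounded to the nearest multiple of 25, clamped to 0..4)
theorem pv_min_eq_formula (d c : Int) :
    ((PySem.List.min2? ([c, c + 25, c + 50, c + 75, c + 100].map (fun i => (|d - i|, i)))
        (fun p => p.1) (fun p => p.2)).map (fun m => m.2)).getD 0
    = c + 25 * max 0 (min 4 (PySem.Int.floordiv (d - c + 12) 25)) := by
  have h1 : 25 * ((d - c + 12).fdiv 25) + (d - c + 12).fmod 25 = d - c + 12 :=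
    Int.mul_fdiv_add_fmod _ _
  have h2 : 0 ≤ (d - c + 12).fmod 25 := Int.fmod_nonneg_of_pos _ (by norm_num)
  have h3 : (d - c + 12).fmod 25 < 25 := Int.fmod_lt_of_pos _ (by norm_num)
  simp only [List.map_cons, List.map_nil]
  rw [pv_min2_pick]
  simp only [Option.map_some, Option.getD_some, List.foldl_cons, List.foldl_nil,
    PySem.Int.floordiv, Int.abs_eq_natAbs]
  rcases lt_or_ge (d - c) 13 with hv | hv
  · rw [show pvPick ((((d - c).natAbs : Int)), c) ((((d - (c + 25)).natAbs : Int)), c + 25) = ((((d - c).natAbs : Int)), c) from pvPick_right _ _ (by omega)]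
    rw [show pvPick ((((d - c).natAbs : Int)), c) ((((d - (c + 50)).natAbs : Int)), c + 50) = ((((d - c).natAbs : Int)), c) from pvPick_right _ _ (by omega)]
    rw [show pvPick ((((d - c).natAbs : Int)), c) ((((d - (c + 75)).natAbs : Int)), c + 75) = ((((d - c).natAbs : Int)), c) from pvPick_right _ _ (by omega)]
    rw [show pvPick ((((d - c).natAbs : Int)), c) ((((d - (c + 100)).natAbs : Int)), c + 100) = ((((d - c).natAbs : Int)), c) from pvPick_right _ _ (by omega)]
    omega
  · rcases lt_or_ge (d - c) 38 with hv2 | hv2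
    · rw [show pvPick ((((d - c).natAbs : Int)), c) ((((d - (c + 25)).natAbs : Int)), c + 25) = ((((d - (c + 25)).natAbs : Int)), c + 25) from pvPick_left _ _ (by omega)]
      rw [show pvPick ((((d - (c + 25)).natAbs : Int)), c + 25) ((((d - (c + 50)).natAbs : Int)), c + 50) = ((((d - (c + 25)).natAbs : Int)), c + 25) from pvPick_right _ _ (by omega)]
      rw [show pvPick ((((d - (c + 25)).natAbs : Int)), c + 25) ((((d - (c + 75)).natAbs : Int)), c + 75) = ((((d - (c + 25)).natAbs : Int)), c + 25) from pvPick_right _ _ (by omega)]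
      rw [show pvPick ((((d - (c + 25)).natAbs : Int)), c + 25) ((((d - (c + 100)).natAbs : Int)), c + 100) = ((((d - (c + 25)).natAbs : Int)), c + 25) from pvPick_right _ _ (by omega)]
      omega
    · rcases lt_or_ge (d - c) 63 with hv3 | hv3
      · rw [show pvPick ((((d - c).natAbs : Int)), c) ((((d - (c + 25)).natAbs : Int)), c + 25) = ((((d - (c + 25)).natAbs : Int)), c + 25) from pvPick_left _ _ (by omega)]
        rw [show pvPick ((((d - (c + 25)).natAbs : Int)), c + 25) ((((d - (c + 50)).natAbs : Int)), c + 50) = ((((d - (c + 50)).natAbs : Int)), c + 50) from pvPick_left _ _ (by omega)]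
        rw [show pvPick ((((d - (c + 50)).natAbs : Int)), c + 50) ((((d - (c + 75)).natAbs : Int)), c + 75) = ((((d - (c + 50)).natAbs : Int)), c + 50) from pvPick_right _ _ (by omega)]
        rw [show pvPick ((((d - (c + 50)).natAbs : Int)), c + 50) ((((d - (c + 100)).natAbs : Int)), c + 100) = ((((d - (c + 50)).natAbs : Int)), c + 50) from pvPick_right _ _ (by omega)]
        omega
      · rcases lt_or_ge (d - c) 88 with hv4 | hv4
        · rw [show pvPick ((((d - c).natAbs : Int)), c) ((((d - (c + 25)).natAbs : Int)), c + 25) = ((((d - (c + 25)).natAbs : Int)), c + 25) from pvPick_left _ _ (by omega)]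
          rw [show pvPick ((((d - (c + 25)).natAbs : Int)), c + 25) ((((d - (c + 50)).natAbs : Int)), c + 50) = ((((d - (c + 50)).natAbs : Int)), c + 50) from pvPick_left _ _ (by omega)]
          rw [show pvPick ((((d - (c + 50)).natAbs : Int)), c + 50) ((((d - (c + 75)).natAbs : Int)), c + 75) = ((((d - (c + 75)).natAbs : Int)), c + 75) from pvPick_left _ _ (by omega)]
          rw [show pvPick ((((d - (c + 75)).natAbs : Int)), c + 75) ((((d - (c + 100)).natAbs : Int)), c + 100) = ((((d - (c + 75)).natAbs : Int)), c + 75) from pvPick_right _ _ (by omega)]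
          omega
        · rw [show pvPick ((((d - c).natAbs : Int)), c) ((((d - (c + 25)).natAbs : Int)), c + 25) = ((((d - (c + 25)).natAbs : Int)), c + 25) from pvPick_left _ _ (by omega)]
          rw [show pvPick ((((d - (c + 25)).natAbs : Int)), c + 25) ((((d - (c + 50)).natAbs : Int)), c + 50) = ((((d - (c + 50)).natAbs : Int)), c + 50) from pvPick_left _ _ (by omega)]
          rw [show pvPick ((((d - (c + 50)).natAbs : Int)), c + 50) ((((d - (c + 75)).natAbs : Int)), c + 75) = ((((d - (c + 75)).natAbs : Int)), c + 75) from pvPick_left _ _ (by omega)]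
          rw [show pvPick ((((d - (c + 75)).natAbs : Int)), c + 75) ((((d - (c + 100)).natAbs : Int)), c + 100) = ((((d - (c + 100)).natAbs : Int)), c + 100) from pvPick_left _ _ (by omega)]
          omega

theorem round_quarter_eq_alt (date : Int) : round_quarter date = round_quarter_alt date := by
  unfold round_quarter round_quarter_alt
  exact pv_min_eq_formula date _

-- ===== VERDICT (by name: the statement is the Claim_ definition above) =====
theorem round_quarter_spec : Claim_equal_round_quarter := by
  intro date _
  unfold Spec_round_quarter
  exact round_quarter_eq_alt date
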